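-- pv_equiv track=rewrite | github.com/JuanesOsorioL/TicNetCorp_MisionTIC | TicNet Corp.py | mostrarMasCercana
-- ===== SOURCE A (Python) =====
-- def mostrarMasCercana(Distancia):
--     control = True
--     cont = 1
--     mostrarprimero = []
--     mostrarsegundo = []
--     segundo = 0
--     posicion = 0
--     copiaLista = list(Distancia)
--     while control:
--         for x in range(len(copiaLista)):
--             if x == 0:
--                 segundo = copiaLista[x][0]
--                 mostrarsegundo = copiaLista[x]
--             elif segundo > copiaLista[x][0]:
--                 segundo = copiaLista[x][0]
--                 mostrarsegundo = copiaLista[x]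
--                 posicion = x
--         if cont == 2:
--             control = False
--         else:
--             copiaLista.pop(posicion)
--             mostrarprimero = mostrarsegundo
--             cont = cont+1
--     return [mostrarprimero, mostrarsegundo]
-- ===== SOURCE B (Python) =====
-- def mostrarMasCercana(Distancia):
--     primero = Distancia[0]
--     if len(Distancia) == 1:
--         return [primero, primero]
--     a, b = Distancia[0], Distancia[1]
--     if b[0] < a[0]:
--         a, b = b, a
--     for e in Distancia[2:]:
--         if e[0] < a[0]:
--             a, b = e, a
--         elif e[0] < b[0]:
--             b = e
--     return [a, b]
-- ===== Notes on version B (the rewrite author's own statement) =====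
-- stated objective: alternative
-- what changed: A finds the minimum by first coordinate, pops it out of a copy and scans again; B makes a single left-to-right pass that maintains the two smallest entries (stable, strict comparisons), with no copy and no pop.
import Mathlib
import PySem

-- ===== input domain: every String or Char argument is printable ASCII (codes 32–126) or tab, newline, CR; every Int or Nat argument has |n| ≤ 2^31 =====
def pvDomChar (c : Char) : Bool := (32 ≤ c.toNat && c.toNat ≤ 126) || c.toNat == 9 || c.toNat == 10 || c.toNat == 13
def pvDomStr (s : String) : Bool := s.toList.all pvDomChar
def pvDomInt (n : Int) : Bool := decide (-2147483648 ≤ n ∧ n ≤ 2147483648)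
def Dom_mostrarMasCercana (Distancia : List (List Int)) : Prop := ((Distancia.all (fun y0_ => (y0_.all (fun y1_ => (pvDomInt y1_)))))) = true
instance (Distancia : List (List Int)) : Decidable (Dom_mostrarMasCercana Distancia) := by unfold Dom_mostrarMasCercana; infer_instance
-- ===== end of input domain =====

-- B replaces A's two min-scans (find the minimum by first coordinate, pop it, scan again)
-- by a single left-to-right pass that maintains the two smallest entries; return value only
-- (A copies its argument, neither program mutates it).

-- ===== PORT A =====
-- e[0] (both Pythons read the first coordinate this way; Pre_ keeps inner lists nonempty)
def pvK (e : List Int) : Int := PySem.List.pyGetD e 0 0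

-- 'for x in range(len(copiaLista)): …' — elements visited in index order, x is the index;
-- state (segundo, mostrarsegundo, posicion), branches in A's order
def pvForPass (rest : List (List Int)) (x : Nat) (segundo : Int) (ms : List Int) (pos : Int) :
    Int × List Int × Int :=
  match rest with
  | [] => (segundo, ms, pos)
  | e :: r =>
    if x = 0 then pvForPass r (x+1) (pvK e) e pos
    else if segundo > pvK e then pvForPass r (x+1) (pvK e) e (Int.ofNat x)
    else pvForPass r (x+1) segundo ms pos

-- A's 'while control' loop; fuel only makes the recursion total (the loop body runs exactly
-- twice and the condition is tested once more, so fuel 3 is exact)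
def pvWhileA (fuel : Nat) (control : Bool) (cont : Int) (mp ms : List Int)
    (segundo pos : Int) (copiaLista : List (List Int)) : List Int × List Int :=
  match fuel with
  | 0 => (mp, ms)
  | fuel+1 =>
    if control then
      let st := pvForPass copiaLista 0 segundo ms pos
      if cont = 2 then
        pvWhileA fuel false cont mp st.2.1 st.1 st.2.2 copiaLista
      else
        -- copiaLista.pop(posicion); in range whenever Pre_ holds (pop from empty = IndexError)
        let copiaLista := ((PySem.List.pop? copiaLista st.2.2).map Prod.snd).getD copiaLista
        pvWhileA fuel control (cont+1) st.2.1 st.2.1 st.1 st.2.2 copiaLista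
    else (mp, ms)

def mostrarMasCercana (Distancia : List (List Int)) : List (List Int) :=
  let r := pvWhileA 3 true 1 [] [] 0 0 Distancia
  [r.1, r.2]

-- ===== PORT B =====
-- one pass: (a, b) = the two smallest-by-first-coordinate entries seen so far (stable)
def pvStep (ab : List Int × List Int) (e : List Int) : List Int × List Int :=
  if pvK e < pvK ab.1 then (e, ab.1)
  else if pvK e < pvK ab.2 then (ab.1, e)
  else ab

def mostrarMasCercana_alt (Distancia : List (List Int)) : List (List Int) :=
  match Distancia with
  | [] => []            -- Python B raises IndexError here (excluded by Pre_)
  | [primero] => [primero, primero]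
  | x :: y :: rest =>
    let ab := if pvK y < pvK x then (y, x) else (x, y)
    let ab := rest.foldl pvStep ab
    [ab.1, ab.2]

-- ===== PRECONDITION & SPEC =====
-- Pre_ excludes exactly the inputs where Python A raises: the empty list (pop from an empty
-- list) and inner empty lists (e[0] IndexError).
def Pre_mostrarMasCercana (Distancia : List (List Int)) : Prop :=
  Distancia ≠ [] ∧ ∀ e ∈ Distancia, e ≠ []
instance (Distancia : List (List Int)) : Decidable (Pre_mostrarMasCercana Distancia) := by
  unfold Pre_mostrarMasCercana; infer_instance

def pvWitness_mostrarMasCercana : List (List Int) := [[3, 7], [1], [2, 5]]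

def Spec_mostrarMasCercana (Distancia : List (List Int)) (out : List (List Int)) : Prop := out = mostrarMasCercana_alt Distancia
instance (Distancia : List (List Int)) (out : List (List Int)) : Decidable (Spec_mostrarMasCercana Distancia out) := by unfold Spec_mostrarMasCercana; infer_instance

-- ===== CLAIM (what is proved, stated in full; the proofs are below) =====
def Claim_equal_mostrarMasCercana : Prop := ∀ (Distancia : List (List Int)), Dom_mostrarMasCercana Distancia → Pre_mostrarMasCercana Distancia → Spec_mostrarMasCercana Distancia (mostrarMasCercana Distancia)

-- ===== LEMMAS AND PROOFS =====

-- first element of m :: t with minimal first coordinate (left-biased, strict comparisons)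
def pvFm (m : List Int) : List (List Int) → List Int
  | [] => m
  | e :: r => if pvK e < pvK m then pvFm e r else pvFm m r

-- the pair after B's fold: second component
def pvSm (a b : List Int) : List (List Int) → List Int
  | [] => b
  | e :: r =>
    if pvK e < pvK a then pvSm e a r
    else if pvK e < pvK b then pvSm a e r
    else pvSm a b r

-- t with its first minimal-key element removed
def pvRfm : List (List Int) → List (List Int)
  | [] => []
  | e :: r => if r.all (fun u => decide (pvK e ≤ pvK u)) then r else e :: pvRfm r

-- what A returns as second component for input x :: ys
def pvA2 (x : List Int) (ys : List (List Int)) : List Int :=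
  if ys.all (fun u => decide (pvK x ≤ pvK u)) then
    (match ys with | [] => x | y :: r => pvFm y r)
  else pvFm x (pvRfm ys)

theorem pvFm_self (m : List Int) (t : List (List Int)) (h : ∀ e ∈ t, ¬ pvK e < pvK m) :
    pvFm m t = m := by
  induction t with
  | nil => rfl
  | cons e r ih =>
    simp only [pvFm]
    rw [if_neg (h e (List.mem_cons_self ..))]
    exact ih (fun u hu => h u (List.mem_cons_of_mem _ hu))

theorem pvRfm_cons_of_min (e : List Int) (r : List (List Int))
    (h : ∀ u ∈ r, ¬ pvK u < pvK e) : pvRfm (e :: r) = r := by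
  simp only [pvRfm]
  rw [if_pos]
  simp only [List.all_eq_true, decide_eq_true_eq]
  exact fun u hu => not_lt.mp (h u hu)

theorem pvRfm_cons_of_not (e : List Int) (r : List (List Int))
    (h : ∃ u ∈ r, pvK u < pvK e) : pvRfm (e :: r) = e :: pvRfm r := by
  simp only [pvRfm]
  rw [if_neg]
  simp only [List.all_eq_true, decide_eq_true_eq, not_forall]
  obtain ⟨u, hu, hlt⟩ := h
  exact ⟨u, hu, not_le.mpr hlt⟩

theorem pvFoldB (rest : List (List Int)) (a b : List Int) :
    rest.foldl pvStep (a, b) = (pvFm a rest, pvSm a b rest) := by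
  induction rest generalizing a b with
  | nil => rfl
  | cons e r ih =>
    simp only [List.foldl_cons, pvStep, pvFm, pvSm]
    by_cases h1 : pvK e < pvK a
    · simp only [if_pos h1]; exact ih e a
    · simp only [if_neg h1]
      by_cases h2 : pvK e < pvK b
      · simp only [if_pos h2]; exact ih a e
      · simp only [if_neg h2]; exact ih a b

theorem pvL1 (t : List (List Int)) (a b : List Int) (h : ∀ e ∈ t, ¬ pvK e < pvK a) :
    pvSm a b t = pvFm b t := by
  induction t generalizing b with
  | nil => rfl
  | cons e r ih =>
    have he := h e (List.mem_cons_self ..)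
    have hr : ∀ u ∈ r, ¬ pvK u < pvK a := fun u hu => h u (List.mem_cons_of_mem _ hu)
    simp only [pvSm, pvFm, if_neg he]
    by_cases h2 : pvK e < pvK b
    · simp only [if_pos h2]; exact ih e hr
    · simp only [if_neg h2]; exact ih b hr

theorem pvL2 (t : List (List Int)) (a b : List Int) (h : ∃ e ∈ t, pvK e < pvK a) :
    pvSm a b t = pvFm a (pvRfm t) := by
  induction t generalizing a b with
  | nil => simp at h
  | cons e r ih =>
    by_cases h1 : pvK e < pvK a
    · simp only [pvSm, if_pos h1]
      by_cases hall : ∀ u ∈ r, ¬ pvK u < pvK e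
      · rw [pvRfm_cons_of_min e r hall, pvL1 r e a hall]
      · push_neg at hall
        obtain ⟨u, hu, hlt⟩ := hall
        rw [pvRfm_cons_of_not e r ⟨u, hu, hlt⟩]
        simp only [pvFm, if_pos h1]
        exact ih e a ⟨u, hu, hlt⟩
    · obtain ⟨w, hw, hwlt⟩ := h
      have hwr : w ∈ r := by
        rcases List.mem_cons.mp hw with rfl | hr
        · exact absurd hwlt h1
        · exact hr
      have hex : ∃ u ∈ r, pvK u < pvK a := ⟨w, hwr, hwlt⟩
      have hke : pvK a ≤ pvK e := not_lt.mp h1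
      have : pvRfm (e :: r) = e :: pvRfm r :=
        pvRfm_cons_of_not e r ⟨w, hwr, lt_of_lt_of_le hwlt hke⟩
      rw [this]
      simp only [pvSm, pvFm, if_neg h1]
      by_cases h2 : pvK e < pvK b
      · simp only [if_pos h2]; exact ih a e hex
      · simp only [if_neg h2]; exact ih a b hex

theorem pvLM (t : List (List Int)) (x : Nat) (p : Int) (m : List Int) (hx : x ≠ 0) :
    (pvForPass t x (pvK m) m p).2.1 = pvFm m t := by
  induction t generalizing x p m with
  | nil => rfl
  | cons e r ih =>
    simp only [pvForPass, pvFm, if_neg hx]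
    by_cases h : pvK e < pvK m
    · simp only [if_pos h]; exact ih (x+1) (Int.ofNat x) e (Nat.succ_ne_zero x)
    · simp only [if_neg h]; exact ih (x+1) p m (Nat.succ_ne_zero x)

theorem pvLS1 (t : List (List Int)) (x : Nat) (p : Int) (m : List Int) (hx : x ≠ 0)
    (h : ∀ e ∈ t, ¬ pvK e < pvK m) :
    pvForPass t x (pvK m) m p = (pvK m, m, p) := by
  induction t generalizing x with
  | nil => rfl
  | cons e r ih =>
    simp only [pvForPass, if_neg hx, if_neg (h e (List.mem_cons_self ..))]
    exact ih (x+1) (Nat.succ_ne_zero x) (fun u hu => h u (List.mem_cons_of_mem _ hu))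

theorem pvLS2 (t : List (List Int)) (m : List Int) (x : Nat) (p : Int) (hx : x ≠ 0)
    (h : ∃ e ∈ t, pvK e < pvK m) :
    ∃ j, j < t.length ∧
      pvForPass t x (pvK m) m p = (pvK (pvFm m t), pvFm m t, Int.ofNat (x + j)) ∧
      t.eraseIdx j = pvRfm t := by
  induction t generalizing m x p with
  | nil => simp at h
  | cons e r ih =>
    by_cases h1 : pvK e < pvK m
    · simp only [pvForPass, if_neg hx, if_pos h1]
      by_cases hall : ∀ u ∈ r, ¬ pvK u < pvK e
      · refine ⟨0, by simp, ?_, ?_⟩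
        · rw [pvLS1 r (x+1) (Int.ofNat x) e (Nat.succ_ne_zero x) hall]
          simp only [pvFm, if_pos h1, pvFm_self e r hall, Nat.add_zero]
        · rw [List.eraseIdx_cons_zero, pvRfm_cons_of_min e r hall]
      · push_neg at hall
        obtain ⟨j, hj, heq, her⟩ :=
          ih e (x+1) (Int.ofNat x) (Nat.succ_ne_zero x) hall
        refine ⟨j+1, by simp; omega, ?_, ?_⟩
        · have hx1 : x + (j + 1) = x + 1 + j := by omega
          rw [hx1, heq]
          simp only [pvFm, if_pos h1]
        · rw [List.eraseIdx_cons_succ, her, pvRfm_cons_of_not e r hall]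
    · obtain ⟨w, hw, hwlt⟩ := h
      have hwr : w ∈ r := by
        rcases List.mem_cons.mp hw with rfl | hr
        · exact absurd hwlt h1
        · exact hr
      have hex : ∃ u ∈ r, pvK u < pvK m := ⟨w, hwr, hwlt⟩
      simp only [pvForPass, if_neg hx, if_neg h1]
      obtain ⟨j, hj, heq, her⟩ := ih m (x+1) p (Nat.succ_ne_zero x) hex
      refine ⟨j+1, by simp; omega, ?_, ?_⟩
      · have hx1 : x + (j + 1) = x + 1 + j := by omega
        rw [hx1, heq]
        simp only [pvFm, if_neg h1]
      · rw [List.eraseIdx_cons_succ, her]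
        rw [pvRfm_cons_of_not e r ⟨w, hwr, lt_of_lt_of_le hwlt (not_lt.mp h1)⟩]

theorem pvForPass_zero (e : List Int) (l : List (List Int)) (s : Int) (m : List Int)
    (p : Int) : pvForPass (e :: l) 0 s m p = pvForPass l 1 (pvK e) e p := by
  simp [pvForPass]

theorem pvA_closed (x : List Int) (ys : List (List Int)) :
    mostrarMasCercana (x :: ys) = [pvFm x ys, pvA2 x ys] := by
  by_cases hall : ∀ e ∈ ys, ¬ pvK e < pvK x
  · have hst : pvForPass ys 1 (pvK x) x 0 = (pvK x, x, 0) :=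
      pvLS1 ys 1 0 x one_ne_zero hall
    cases ys with
    | nil =>
      have hA2 : pvA2 x [] = x := by unfold pvA2; simp
      simp only [mostrarMasCercana, pvWhileA, pvForPass_zero, hst,
        reduceIte, reduceCtorEq]
      norm_num
      simp [pvForPass, pvFm, hA2]
    | cons y r =>
      have hA2 : pvA2 x (y :: r) = pvFm y r := by
        unfold pvA2
        rw [if_pos]
        simp only [List.all_eq_true, decide_eq_true_eq]
        exact fun u hu => not_lt.mp (hall u hu)
      simp only [mostrarMasCercana, pvWhileA, pvForPass_zero, hst,
        reduceIte, reduceCtorEq]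
      norm_num
      constructor
      · exact (pvFm_self x (y :: r) hall).symm
      · rw [pvForPass_zero, pvLM r 1 0 y one_ne_zero, hA2]
  · push_neg at hall
    obtain ⟨j, hj, heq, her⟩ := pvLS2 ys x 1 0 one_ne_zero hall
    have hA2 : pvA2 x ys = pvFm x (pvRfm ys) := by
      unfold pvA2
      rw [if_neg]
      simp only [List.all_eq_true, decide_eq_true_eq, not_forall]
      obtain ⟨u, hu, hlt⟩ := hall
      exact ⟨u, hu, not_le.mpr hlt⟩
    have heq' : pvForPass ys 1 (pvK x) x 0 =
        (pvK (pvFm x ys), pvFm x ys, 1 + (j : Int)) := by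
      rw [heq]; congr 1
    have hlen : 1 + j < (x :: ys).length := by simp; omega
    have hpop : PySem.List.pop? (x :: ys) (1 + (j : Int)) =
        some ((x :: ys)[1 + j]'hlen, x :: ys.eraseIdx j) := by
      have h2 := PySem.List.pop?_natCast (xs := x :: ys) (n := 1 + j) hlen
      have hc : ((1 + j : Nat) : Int) = 1 + (j : Int) := by push_cast; ring
      have h4 : (x :: ys).eraseIdx (1 + j) = x :: ys.eraseIdx j := by
        have h3 : 1 + j = j + 1 := by omega
        rw [h3, List.eraseIdx_cons_succ]
      rw [hc, h4] at h2
      exact h2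
    simp only [mostrarMasCercana, pvWhileA, pvForPass_zero, heq',
      reduceIte, reduceCtorEq]
    norm_num
    rw [hpop]
    simp only [Option.map_some, Option.getD_some]
    rw [pvForPass_zero, pvLM (ys.eraseIdx j) 1 (1 + (j : Int)) x one_ne_zero,
      her, hA2]

-- ===== VERDICT (by name: the statement is the Claim_ definition above) =====
theorem mostrarMasCercana_spec : Claim_equal_mostrarMasCercana := by
  intro D _ hpre
  obtain ⟨hne, _⟩ := hpre
  unfold Spec_mostrarMasCercana
  match D with
  | [] => exact absurd rfl hne
  | [x] =>
    rw [pvA_closed]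
    simp [mostrarMasCercana_alt, pvFm, pvA2]
  | x :: y :: rest =>
    rw [pvA_closed]
    simp only [mostrarMasCercana_alt]
    by_cases hy : pvK y < pvK x
    · rw [if_pos hy, pvFoldB]
      have hfm : pvFm x (y :: rest) = pvFm y rest := by simp [pvFm, hy]
      by_cases hall2 : ∀ u ∈ rest, ¬ pvK u < pvK y
      · have hallx : ∃ e ∈ (y :: rest), pvK e < pvK x := ⟨y, List.mem_cons_self .., hy⟩
        have hA2 : pvA2 x (y :: rest) = pvFm x rest := by
          unfold pvA2
          rw [if_neg, pvRfm_cons_of_min y rest hall2]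
          simp only [List.all_eq_true, decide_eq_true_eq, not_forall]
          exact ⟨y, List.mem_cons_self .., not_le.mpr hy⟩
        rw [hA2, hfm, pvL1 rest y x hall2]
      · push_neg at hall2
        have hA2 : pvA2 x (y :: rest) = pvFm y (pvRfm rest) := by
          unfold pvA2
          rw [if_neg, pvRfm_cons_of_not y rest hall2]
          · simp [pvFm, hy]
          · simp only [List.all_eq_true, decide_eq_true_eq, not_forall]
            exact ⟨y, List.mem_cons_self .., not_le.mpr hy⟩
        rw [hA2, hfm, pvL2 rest y x hall2]
    · rw [if_neg hy, pvFoldB]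
      have hfm : pvFm x (y :: rest) = pvFm x rest := by simp [pvFm, hy]
      by_cases hall : ∀ e ∈ (y :: rest), ¬ pvK e < pvK x
      · have hA2 : pvA2 x (y :: rest) = pvFm y rest := by
          unfold pvA2
          rw [if_pos]
          simp only [List.all_eq_true, decide_eq_true_eq]
          exact fun u hu => not_lt.mp (hall u hu)
        rw [hA2, hfm, pvFm_self x rest
          (fun u hu => hall u (List.mem_cons_of_mem _ hu)),
          pvL1 rest x y (fun u hu => hall u (List.mem_cons_of_mem _ hu))]
      · push_neg at hall
        obtain ⟨w, hw, hwlt⟩ := hall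
        have hwr : w ∈ rest := by
          rcases List.mem_cons.mp hw with rfl | hr
          · exact absurd hwlt hy
          · exact hr
        have hex : ∃ u ∈ rest, pvK u < pvK x := ⟨w, hwr, hwlt⟩
        have hA2 : pvA2 x (y :: rest) = pvFm x (pvRfm rest) := by
          unfold pvA2
          rw [if_neg, pvRfm_cons_of_not y rest
            ⟨w, hwr, lt_of_lt_of_le hwlt (not_lt.mp hy)⟩]
          · simp [pvFm, hy]
          · simp only [List.all_eq_true, decide_eq_true_eq, not_forall]
            exact ⟨w, hw, not_le.mpr hwlt⟩
        rw [hA2, hfm, pvL2 rest x y hex]
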